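-- pv_equiv track=rewrite | github.com/dkw-aau/rdf-archiving-sparql-experiments | queries/queries_to_json.py | section_to_lines
-- ===== SOURCE A (Python) =====
-- def section_to_lines(sec: str):
--     lines = {}
--     ln = 0
--     indent = 0
--     skip_indent = False
--     for l in sec.split('\n'):
--         l = l.strip()
--         if '{' in l:
--             indent += 1
--             skip_indent = True
--         if '}' in l:
--             indent -= 1
--         if not l == "":
--             t = ''
--             for i in range(indent-int(skip_indent)):
--                 t += '\t'
--             lines[ln] = t+l
--         ln += 1
--         skip_indent = False
--     return lines
-- ===== SOURCE B (Python) =====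
-- def section_to_lines(sec: str):
--     # pass 1: per-line table of stripped text and brace flags
--     rows = []
--     for l in sec.split('\n'):
--         t = l.strip()
--         rows.append((t, '{' in t, '}' in t))
--     # pass 2: running indent as a prefix sum of the brace deltas
--     indents = []
--     d = 0
--     for _, o, c in rows:
--         d += (1 if o else 0) - (1 if c else 0)
--         indents.append(d)
--     # pass 3: project the non-empty lines, keyed by their raw index
--     return {i: '\t' * (d - (1 if o else 0)) + t
--             for i, ((t, o, _), d) in enumerate(zip(rows, indents)) if t}
-- ===== Notes on version B (the rewrite author's own statement) =====
-- stated objective: alternative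
-- what changed: A's single stateful loop (dict, line counter, indent, skip flag mutated together) is replaced by three passes: a per-line table of (stripped text, brace flags), a prefix sum of the brace deltas giving the running indent, and a dict comprehension over enumerate(zip(...)) projecting the non-empty lines; the character-by-character tab loop becomes string repetition.
import Mathlib
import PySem

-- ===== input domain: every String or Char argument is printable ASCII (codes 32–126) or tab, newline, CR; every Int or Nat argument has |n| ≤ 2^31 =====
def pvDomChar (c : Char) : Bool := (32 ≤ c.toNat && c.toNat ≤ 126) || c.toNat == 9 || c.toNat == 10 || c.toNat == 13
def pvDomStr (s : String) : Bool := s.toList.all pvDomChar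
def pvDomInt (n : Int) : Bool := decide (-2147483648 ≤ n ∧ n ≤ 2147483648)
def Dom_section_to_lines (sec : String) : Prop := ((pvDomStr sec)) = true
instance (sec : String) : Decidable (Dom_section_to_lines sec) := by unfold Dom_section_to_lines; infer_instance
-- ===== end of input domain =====

-- B replaces A's single stateful loop by three passes (per-line flag table, prefix-sum of
-- brace deltas, projection of the non-empty lines); same value, objective: alternative.

-- ===== PORT A =====
-- one iteration of A's for-loop; state = (lines, ln, indent); skip_indent is reset to
-- False at the end of every iteration, so it is the local `p.2` of the iteration
def pvStepA (st : PySem.Dict Int String × Int × Int) (l : String) :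
    PySem.Dict Int String × Int × Int :=
  let lines := st.1
  let ln := st.2.1
  let l := PySem.Str.strip l
  let p := if PySem.Str.isIn "{" l then (st.2.2 + 1, true) else (st.2.2, false)
  let indent := if PySem.Str.isIn "}" l then p.1 - 1 else p.1
  let lines :=
    if ¬ (l = "") then
      -- t = ''; for i in range(indent-int(skip_indent)): t += '\t'
      let t := (PySem.List.pyRange 0 (indent - (if p.2 then 1 else 0)) 1).foldl
        (fun t _ => t ++ "\t") ""
      lines.insert ln (t ++ l)
    else lines
  (lines, ln + 1, indent)

def section_to_lines (sec : String) : List (Int × String) :=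
  -- sec.split('\n'); '\n' ≠ '' so split? always returns some
  (((PySem.Str.split? sec "\n").getD []).foldl pvStepA (PySem.Dict.empty, 0, 0)).1.items

-- ===== PORT B =====
-- pass 1 row: (stripped text, '{' in t, '}' in t)
def pvRowB (l : String) : String × Bool × Bool :=
  let t := PySem.Str.strip l
  (t, PySem.Str.isIn "{" t, PySem.Str.isIn "}" t)

def pvDelta (r : String × Bool × Bool) : Int :=
  (if r.2.1 then 1 else 0) - (if r.2.2 then 1 else 0)

def section_to_lines_alt (sec : String) : List (Int × String) :=
  let rows := ((PySem.Str.split? sec "\n").getD []).map pvRowB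
  -- pass 2: indents = running prefix sums of the deltas
  let indents := (rows.foldl
    (fun (p : List Int × Int) r => let d := p.2 + pvDelta r; (p.1 ++ [d], d)) ([], 0)).1
  -- pass 3: dict comprehension over enumerate(zip(rows, indents)) keeping non-empty rows
  (PySem.List.enumerate (rows.zip indents)).filterMap (fun q =>
    if q.2.1.1 ≠ "" then
      some (q.1, String.ofList (List.replicate
        (q.2.2 - (if q.2.1.2.1 then 1 else 0)).toNat '\t') ++ q.2.1.1)
    else none)

-- ===== PRECONDITION & SPEC =====
def Spec_section_to_lines (sec : String) (out : List (Int × String)) : Prop := out = section_to_lines_alt sec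
instance (sec : String) (out : List (Int × String)) : Decidable (Spec_section_to_lines sec out) := by unfold Spec_section_to_lines; infer_instance

-- ===== CLAIM (what is proved, stated in full; the proofs are below) =====
def Claim_equal_section_to_lines : Prop := ∀ (sec : String), Dom_section_to_lines sec → Spec_section_to_lines sec (section_to_lines sec)

-- ===== LEMMAS AND PROOFS =====

def pvTabs (n : Int) : String := String.ofList (List.replicate n.toNat '\t')

-- the common per-line output both programs produce, keyed from ln at running indent d
def pvBuild (ln d : Int) : List (String × Bool × Bool) → List (Int × String)
  | [] => []
  | r :: rs =>
    let d' := d + pvDelta r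
    (if r.1 ≠ "" then [(ln, pvTabs (d' - (if r.2.1 then 1 else 0)) ++ r.1)] else [])
      ++ pvBuild (ln + 1) d' rs

-- prefix sums of the deltas, as a plain recursion
def pvSums (d : Int) : List (String × Bool × Bool) → List Int
  | [] => []
  | r :: rs => (d + pvDelta r) :: pvSums (d + pvDelta r) rs

theorem pv_str_ext {s t : String} (h : s.toList = t.toList) : s = t := by
  have := congrArg String.ofList h; simpa using this

theorem pv_tabs_foldl (L : List Int) (s : String) :
    L.foldl (fun t _ => t ++ "\t") s = s ++ String.ofList (List.replicate L.length '\t') := by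
  induction L generalizing s with
  | nil => exact pv_str_ext (by simp)
  | cons x xs ih =>
      simp only [List.foldl_cons, ih, List.length_cons]
      exact pv_str_ext (by simp [List.replicate_succ])

theorem pv_tabs_pyRange (n : Int) :
    (PySem.List.pyRange 0 n 1).foldl (fun t _ => t ++ "\t") "" = pvTabs n := by
  rw [pv_tabs_foldl, PySem.List.length_pyRange_one]
  exact pv_str_ext (by simp [pvTabs])

theorem pv_sums_foldl (rs : List (String × Bool × Bool)) (acc : List Int) (d : Int) :
    (rs.foldl (fun (p : List Int × Int) r =>
        let d := p.2 + pvDelta r; (p.1 ++ [d], d)) (acc, d)).1 = acc ++ pvSums d rs := by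
  induction rs generalizing acc d with
  | nil => simp [pvSums]
  | cons r rs ih => simp [pvSums, ih]

theorem pv_alt_build (rs : List (String × Bool × Bool)) (n d : Int) :
    (PySem.List.enumerate (rs.zip (pvSums d rs)) n).filterMap (fun q =>
      if q.2.1.1 ≠ "" then
        some (q.1, String.ofList (List.replicate
          (q.2.2 - (if q.2.1.2.1 then 1 else 0)).toNat '\t') ++ q.2.1.1)
      else none) = pvBuild n d rs := by
  induction rs generalizing n d with
  | nil => simp [pvSums, pvBuild, PySem.List.enumerate_nil]
  | cons r rs ih =>
      simp only [pvSums, List.zip_cons_cons, PySem.List.enumerate_cons,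
        List.filterMap_cons]
      rw [ih]
      by_cases h : r.1 = ""
      · simp [h, pvBuild]
      · simp [h, pvBuild, pvTabs]

theorem pvStepA_eq (D : PySem.Dict Int String) (ln d : Int) (l : String) :
    pvStepA (D, ln, d) l =
      ((if PySem.Str.strip l = "" then D
        else D.insert ln
          (pvTabs (d + pvDelta (pvRowB l) - (if (pvRowB l).2.1 then 1 else 0))
            ++ PySem.Str.strip l)),
       ln + 1, d + pvDelta (pvRowB l)) := by
  unfold pvStepA pvRowB pvDelta
  cases ho : PySem.Str.isIn "{" (PySem.Str.strip l) <;>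
    cases hc : PySem.Str.isIn "}" (PySem.Str.strip l) <;>
      simp only [ho, hc, if_true, if_false, Bool.false_eq_true,
        pv_tabs_pyRange] <;>
    by_cases h : PySem.Str.strip l = "" <;>
      simp only [h, not_true, not_false_iff, if_neg, if_pos] <;>
  · refine Prod.ext ?_ (Prod.ext ?_ ?_) <;> simp <;>
      first
        | omega
        | exact congrArg (fun x => D.insert ln (pvTabs x ++ PySem.Str.strip l)) (by omega)

theorem pv_fold_A (ls : List String) (D : PySem.Dict Int String) (ln d : Int)
    (hk : ∀ k ∈ D.keys, k < ln) :
    ((ls.foldl pvStepA (D, ln, d)).1).items = D.items ++ pvBuild ln d (ls.map pvRowB) := by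
  induction ls generalizing D ln d with
  | nil => simp [pvBuild]
  | cons l ls ih =>
      have hfresh : D.contains ln = false := by
        by_contra h
        have : ln ∈ D.keys := (PySem.Dict.contains_iff_mem_keys D ln).mp
          (by revert h; cases D.contains ln <;> simp)
        exact absurd (hk ln this) (lt_irrefl ln)
      simp only [List.foldl_cons, List.map_cons, pvBuild, pvStepA_eq]
      by_cases h : PySem.Str.strip l = ""
      · -- empty stripped line: no entry, indent still updated by the (false) flags
        rw [if_pos h, ih D (ln + 1) _ (fun k hkm => lt_trans (hk k hkm) (by omega))]
        simp [pvRowB, h]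
      · rw [if_neg h, ih _ (ln + 1) _ ?_]
        · rw [PySem.Dict.items_insert_of_not_contains D _ hfresh]
          simp [pvRowB, h]
        · intro k hkm
          rcases (PySem.Dict.mem_keys_insert _ _ _ _).mp hkm with h' | h'
          · omega
          · exact lt_trans (hk k h') (by omega)

-- ===== VERDICT (by name: the statement is the Claim_ definition above) =====
theorem section_to_lines_spec : Claim_equal_section_to_lines := by
  intro sec _
  unfold Spec_section_to_lines section_to_lines section_to_lines_alt
  rw [pv_fold_A _ _ _ _ (by simp [PySem.Dict.keys_empty])]
  simp only [pv_sums_foldl, pv_alt_build, PySem.Dict.empty,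
    List.nil_append]
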